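-- pv_equiv track=rewrite | github.com/jorgenschaefer/elpy | elpy/utils/findundefined.py | _not_found
-- ===== SOURCE A (Python) =====
-- def _not_found(var, env):
--     """Return True if var nor any of its prefix is in env."""
--     if var in env:
--         return False
--     while "." in var:
--         var = var[:var.rindex(".")]
--         if var in env:
--             return False
--     return True
-- ===== SOURCE B (Python) =====
-- def _not_found(var, env):
--     """Return True if var nor any of its prefix is in env."""
--     parts = var.split(".")
--     cur = parts[0]
--     for p in parts[1:]:
--         if cur in env:
--             return False
--         cur = cur + "." + p
--     return cur not in env
-- ===== Notes on version B (the rewrite author's own statement) =====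
-- stated objective: alternative
-- what changed: B splits var once on '.' and folds forward over cumulative prefixes (shortest-to-longest), instead of A's while loop that repeatedly slices the string at rindex('.') longest-to-shortest.
import Mathlib
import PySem

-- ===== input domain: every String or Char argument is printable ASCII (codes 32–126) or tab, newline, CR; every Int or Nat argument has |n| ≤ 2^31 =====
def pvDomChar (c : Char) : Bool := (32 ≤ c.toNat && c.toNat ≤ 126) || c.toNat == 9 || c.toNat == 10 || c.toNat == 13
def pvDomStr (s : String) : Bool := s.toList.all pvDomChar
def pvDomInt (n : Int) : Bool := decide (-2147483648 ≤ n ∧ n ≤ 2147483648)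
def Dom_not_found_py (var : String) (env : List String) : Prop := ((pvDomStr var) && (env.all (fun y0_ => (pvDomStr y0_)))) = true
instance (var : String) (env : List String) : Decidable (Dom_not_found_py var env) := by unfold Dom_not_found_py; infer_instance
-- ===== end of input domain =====

-- B replaces A's longest-to-shortest rindex/slice loop by one split('.') plus a forward fold
-- over cumulative prefixes (alternative decomposition; same observable result).

-- ===== PORT A =====
-- helper facts about rfind, needed by the port's termination proof (cited in decreasing_by)

-- [a] is a prefix of l iff l starts with a
theorem pvSingleton_prefix_iff (a : Char) (l : List Char) : [a] <+: l ↔ l.head? = some a := by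
  cases l <;> simp [List.prefix_cons_iff, eq_comm]

-- rfind.go returns either -1 (no occurrence at index ≤ k) or the largest index ≤ k of an occurrence
theorem pvRfindGo_spec (s : List Char) (k : Nat) :
    (PySem.Chars.rfind.go s ['.'] k = -1 ∧ ∀ i ≤ k, ¬ ['.'] <+: s.drop i) ∨
    (∃ j : Nat, PySem.Chars.rfind.go s ['.'] k = (j : Int) ∧ j ≤ k ∧ ['.'] <+: s.drop j ∧
      ∀ i, j < i → i ≤ k → ¬ ['.'] <+: s.drop i) := by
  induction k with
  | zero =>
    rw [PySem.Chars.rfind.go.eq_def]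
    by_cases h : ['.'].isPrefixOf s = true
    · right
      refine ⟨0, by simp [h], le_refl 0, by simpa using h, by omega⟩
    · left
      refine ⟨by simp [h], ?_⟩
      intro i hi
      interval_cases i
      simpa using h
  | succ k ih =>
    rw [PySem.Chars.rfind.go.eq_def]
    by_cases h : ['.'].isPrefixOf (List.drop (k + 1) s) = true
    · right
      exact ⟨k + 1, by simp [h], le_refl _, by simpa using h, by omega⟩
    · simp only [h]
      rcases ih with ⟨h1, h2⟩ | ⟨j, h1, h2, h3, h4⟩
      · left
        refine ⟨h1, ?_⟩
        intro i hi
        rcases Nat.lt_or_ge i (k + 1) with hl | hl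
        · exact h2 i (by omega)
        · have : i = k + 1 := by omega
          subst this
          simpa using h
      · right
        refine ⟨j, h1, by omega, h3, ?_⟩
        intro i hji hik
        rcases Nat.lt_or_ge i (k + 1) with hl | hl
        · exact h4 i hji (by omega)
        · have : i = k + 1 := by omega
          subst this
          simpa using h
-- if '.' occurs in s, rfind s ['.'] is the largest index of a '.' in s
theorem pvRfind_dot_spec (s : List Char) (h : PySem.Chars.isIn ['.'] s = true) :
    ∃ j : Nat, PySem.Chars.rfind s ['.'] = (j : Int) ∧ j < s.length ∧ s[j]? = some '.' ∧
      ∀ i, j < i → s[i]? ≠ some '.' := by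
  have hex : ∃ j, ['.'] <+: s.drop j := (PySem.Chars.exists_prefix_drop_iff_isIn ['.'] s).mpr h
  rw [PySem.Chars.rfind.eq_def]
  rcases pvRfindGo_spec s s.length with ⟨_, h2⟩ | ⟨j, h1, _, h3, h4⟩
  · exfalso
    obtain ⟨j, hj⟩ := hex
    rcases Nat.lt_or_ge s.length j with hlt | hge
    · rw [List.drop_eq_nil_of_le (by omega)] at hj
      simpa [pvSingleton_prefix_iff] using hj
    · exact h2 j hge hj
  · refine ⟨j, h1, ?_, ?_, ?_⟩
    · rw [pvSingleton_prefix_iff] at h3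
      have hne : s.drop j ≠ [] := by intro hnil; rw [hnil] at h3; simp at h3
      rcases Nat.lt_or_ge j s.length with hlt | hge
      · exact hlt
      · exact absurd (List.drop_eq_nil_of_le hge) hne
    · rw [pvSingleton_prefix_iff, List.head?_drop] at h3
      exact h3
    · intro i hji hget
      rcases Nat.lt_or_ge s.length i with hlt | hge
      · rw [List.getElem?_eq_none (by omega)] at hget
        simp at hget
      · exact h4 i hji hge (by rw [pvSingleton_prefix_iff, List.head?_drop]; exact hget)

-- the chopped string var[:var.rindex(".")] from A's loop body
def pvChop (s : List Char) : List Char :=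
  PySem.Chars.slice s none (some (PySem.Chars.rfind s ['.']))

-- the chop is strictly shorter (termination of A's while loop)
theorem pvChop_length_lt (s : List Char) (h : PySem.Chars.isIn ['.'] s = true) :
    (pvChop s).length < s.length := by
  obtain ⟨j, h1, h2, _, _⟩ := pvRfind_dot_spec s h
  unfold pvChop
  rw [PySem.Chars.slice_eq_listSlice, h1, PySem.List.slice_to s (by omega : (0:Int) ≤ (j:Int))]
  simp
  omega

-- the 'while "." in var' loop of A
def pvNfLoop (env : List (List Char)) (s : List Char) : Bool :=
  if h : PySem.Chars.isIn ['.'] s = true then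
    let s' := pvChop s
    if env.contains s' then false else pvNfLoop env s'
  else true
termination_by s.length
decreasing_by exact pvChop_length_lt s h

def not_found_py (var : String) (env : List String) : Bool :=
  let envL := env.map String.toList
  if envL.contains var.toList then false
  else pvNfLoop envL var.toList

-- ===== PORT B =====
-- the 'for p in parts[1:]' loop of B, carrying the cumulative prefix cur
def pvNfGo (env : List (List Char)) (cur : List Char) : List (List Char) → Bool
  | [] => !env.contains cur
  | p :: ps => if env.contains cur then false else pvNfGo env (cur ++ '.' :: p) ps

def not_found_py_alt (var : String) (env : List String) : Bool :=
  let envL := env.map String.toList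
  match List.splitOn '.' var.toList with
  | [] => true  -- unreachable: splitOn never returns []
  | h :: t => pvNfGo envL h t

-- ===== PRECONDITION & SPEC =====
def Spec_not_found_py (var : String) (env : List String) (out : Bool) : Prop := out = not_found_py_alt var env
instance (var : String) (env : List String) (out : Bool) : Decidable (Spec_not_found_py var env out) := by unfold Spec_not_found_py; infer_instance

-- ===== CLAIM (what is proved, stated in full; the proofs are below) =====
def Claim_equal_not_found_py : Prop := ∀ (var : String) (env : List String), Dom_not_found_py var env → Spec_not_found_py var env (not_found_py var env)

-- ===== LEMMAS AND PROOFS =====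

-- '.' in s (PySem) iff '.' ∈ s (List membership)
theorem pvIsIn_dot_iff (s : List Char) : PySem.Chars.isIn ['.'] s = true ↔ '.' ∈ s := by
  rw [PySem.Chars.isIn_iff_infix, List.singleton_infix_iff]

-- B's loop over t ++ [q] peels off the final component: the last cumulative prefix checked
-- is the fold of all of t onto cur, extended by '.' and q
theorem pvNfGo_append (env : List (List Char)) (cur q : List Char) (t : List (List Char)) :
    pvNfGo env cur (t ++ [q]) =
      (pvNfGo env cur t && !env.contains ((t.foldl (fun a p => a ++ '.' :: p) cur) ++ '.' :: q)) := by
  induction t generalizing cur with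
  | nil =>
    simp only [List.nil_append, pvNfGo, List.foldl_nil]
    by_cases h : env.contains cur = true <;> simp [h]
  | cons p ps ih =>
    simp only [List.cons_append, pvNfGo, List.foldl_cons]
    by_cases h : env.contains cur = true <;> simp [h, ih, Bool.and_assoc]

-- the fold of components onto cur is intercalation with '.'
-- intercalate over a two-or-more list peels the head
theorem pvIntercalate_cons (x y : List Char) (l : List (List Char)) :
    ['.'].intercalate (x :: y :: l) = x ++ '.' :: ['.'].intercalate (y :: l) := by
  simp [List.intercalate, List.intersperse_cons₂]

-- the fold of components onto cur is intercalation with '.'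
theorem pvFoldl_intercalate (t : List (List Char)) (cur : List Char) :
    t.foldl (fun a p => a ++ '.' :: p) cur = ['.'].intercalate (cur :: t) := by
  induction t generalizing cur with
  | nil => simp [List.intercalate]
  | cons p ps ih =>
    rw [List.foldl_cons, ih, pvIntercalate_cons]
    cases ps with
    | nil => simp [List.intercalate]
    | cons z zs => rw [pvIntercalate_cons, pvIntercalate_cons]; simp

-- the core equivalence, by strong induction on the length of s
theorem pvMain (env : List (List Char)) :
    ∀ (n : Nat) (s : List Char), s.length ≤ n →
      (if env.contains s then false else pvNfLoop env s) =
        (match List.splitOn '.' s with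
         | [] => true
         | h :: t => pvNfGo env h t) := by
  intro n
  induction n with
  | zero =>
    intro s hs
    have hnil : s = [] := List.eq_nil_of_length_eq_zero (by omega)
    subst hnil
    have hno : PySem.Chars.isIn ['.'] ([] : List Char) = true ↔ False := by
      rw [pvIsIn_dot_iff]; simp
    rw [pvNfLoop, dif_neg (by simp [hno])]
    rw [show List.splitOn '.' ([] : List Char) = [[]] from by
      unfold List.splitOn; exact List.splitOnP_nil _]
    simp only [pvNfGo]
    by_cases h : env.contains ([] : List Char) = true <;> simp [h]
  | succ n ih =>
    intro s hs
    by_cases hdot : PySem.Chars.isIn ['.'] s = true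
    · -- s contains a dot: decompose s = a ++ '.' :: b with b dot-free
      obtain ⟨j, h1, h2, h3, h4⟩ := pvRfind_dot_spec s hdot
      set a := s.take j with ha
      set b := s.drop (j + 1) with hb
      have hsj : s[j]? = some '.' := h3
      have hgj : s[j]'(h2) = '.' := by
        have := List.getElem?_eq_getElem h2 (l := s)
        rw [hsj] at this
        exact (Option.some_injective _ this.symm)
      have hdecomp : s = a ++ '.' :: b := by
        rw [ha, hb]
        conv_lhs => rw [← List.take_append_drop j s]
        rw [List.drop_eq_getElem_cons h2, hgj]
      have hbnd : '.' ∉ b := by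
        intro hmem
        obtain ⟨t, ht, hbt⟩ := List.getElem_of_mem hmem
        have : s[j + 1 + t]? = some '.' := by
          rw [← List.getElem?_drop, ← hb, List.getElem?_eq_getElem ht, hbt]
        exact h4 (j + 1 + t) (by omega) this
      have hchop : pvChop s = a := by
        unfold pvChop
        rw [PySem.Chars.slice_eq_listSlice, h1, PySem.List.slice_to s (by omega : (0:Int) ≤ (j:Int))]
        simp [ha]
      have halen : a.length ≤ n := by
        have : a.length = j := by simp [ha]; omega
        omega
      -- unfold A one step
      rw [pvNfLoop, dif_pos hdot, hchop]
      -- split s on '.' one step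
      have hsplit : List.splitOn '.' s = List.splitOn '.' a ++ [b] := by
        rw [hdecomp]
        unfold List.splitOn
        rw [List.splitOnP_append_cons (· == '.') a b '.' (by simp)]
        rw [List.splitOnP_eq_single (· == '.') b
          (by intro x hx hpx; exact hbnd (by rwa [show x = '.' from by simpa using hpx] at hx))]
      obtain ⟨h0, t0, hsa⟩ := List.exists_cons_of_ne_nil
        (show List.splitOn '.' a ≠ [] from List.splitOnP_ne_nil _ a)
      have hIH0 := ih a halen
      rw [hsa] at hIH0
      have hIH : (if env.contains a = true then false else pvNfLoop env a) = pvNfGo env h0 t0 :=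
        hIH0
      have hinter : (t0.foldl (fun x p => x ++ '.' :: p) h0) = a := by
        rw [pvFoldl_intercalate, ← hsa]
        exact List.intercalate_splitOn a '.'
      have hRHS : (match List.splitOn '.' s with
          | [] => true
          | h :: t => pvNfGo env h t) = pvNfGo env h0 (t0 ++ [b]) := by
        rw [hsplit, hsa]
        rfl
      rw [hRHS, pvNfGo_append env h0 b t0, hinter, ← hdecomp, ← hIH]
      by_cases hca : env.contains a = true <;> by_cases hcs : env.contains s = true <;>
        simp [hca, hcs, Bool.and_comm, Bool.and_left_comm]
    · -- no dot: A's loop exits at once, split gives a single piece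
      rw [pvNfLoop, dif_neg hdot]
      have hnd : '.' ∉ s := fun hmem => hdot ((pvIsIn_dot_iff s).mpr hmem)
      have : List.splitOn '.' s = [s] := by
        unfold List.splitOn
        exact List.splitOnP_eq_single _ s
          (fun x hx hpx => hnd (by rwa [show x = '.' from by simpa using hpx] at hx))
      rw [this]
      simp only [pvNfGo]
      by_cases h : env.contains s = true <;> simp [h]

-- ===== VERDICT (by name: the statement is the Claim_ definition above) =====
theorem not_found_py_spec : Claim_equal_not_found_py := by
  intro var env _
  unfold Spec_not_found_py not_found_py not_found_py_alt
  exact pvMain (env.map String.toList) var.toList.length var.toList (le_refl _)
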